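-- pv_equiv track=rewrite | github.com/BedRockJie/ai-skills | scripts/validate_skills.py | paragraph_after
-- ===== SOURCE A (Python) =====
-- def stripped_lines(lines: list[str]) -> list[str]:
--     return [line.strip() for line in lines]
--
-- def find_heading_index(lines: list[str], heading: str) -> int | None:
--     for index, line in enumerate(lines):
--         if line == heading:
--             return index
--     return None
--
-- def paragraph_after(lines: list[str], heading: str) -> str:
--     start = find_heading_index(stripped_lines(lines), heading)
--     if start is None:
--         return ""
--
--     content: list[str] = []
--     for line in lines[start + 1 :]:
--         stripped = line.strip()
--         if stripped.startswith("#"):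
--             break
--         if stripped:
--             content.append(stripped)
--     return " ".join(content)
-- ===== SOURCE B (Python) =====
-- def paragraph_after(lines: list[str], heading: str) -> str:
--     found = False
--     content: list[str] = []
--     for line in lines:
--         stripped = line.strip()
--         if not found:
--             if stripped == heading:
--                 found = True
--             continue
--         if stripped.startswith("#"):
--             break
--         if stripped:
--             content.append(stripped)
--     return " ".join(content)
-- ===== Notes on version B (the rewrite author's own statement) =====
-- stated objective: alternative
-- what changed: Replaced A's three-pass pipeline (strip every line into a new list, scan it for the heading's index, then slice and loop again) by a single state-machine pass with a 'found' flag that stops at the paragraph end and builds no intermediate stripped list.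
import Mathlib
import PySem

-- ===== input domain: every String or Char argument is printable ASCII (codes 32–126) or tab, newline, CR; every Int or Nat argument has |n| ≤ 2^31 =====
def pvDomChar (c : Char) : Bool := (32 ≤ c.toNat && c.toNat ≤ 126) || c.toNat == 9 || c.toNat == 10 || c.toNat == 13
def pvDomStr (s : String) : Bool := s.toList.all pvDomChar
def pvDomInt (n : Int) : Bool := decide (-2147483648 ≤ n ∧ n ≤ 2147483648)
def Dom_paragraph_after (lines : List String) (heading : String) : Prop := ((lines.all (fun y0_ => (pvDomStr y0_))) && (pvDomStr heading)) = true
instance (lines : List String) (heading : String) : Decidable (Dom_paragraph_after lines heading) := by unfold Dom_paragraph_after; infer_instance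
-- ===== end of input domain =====

-- B replaces A's three passes (strip-all, find index, slice-and-collect) by one flagged pass; return values proved equal.

-- ===== PORT A =====
def stripped_lines (lines : List String) : List String :=
  lines.map (fun line => PySem.Str.strip line)

def find_heading_index_aux (lines : List String) (heading : String) (index : Int) : Option Int :=
  match lines with
  | [] => none
  | line :: rest =>
      if line == heading then some index
      else find_heading_index_aux rest heading (index + 1)

def find_heading_index (lines : List String) (heading : String) : Option Int :=
  find_heading_index_aux lines heading 0

-- the 'for line in lines[start+1:]' loop with its break
def pa_collect (lines : List String) : List String :=
  match lines with
  | [] => []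
  | line :: rest =>
      let stripped := PySem.Str.strip line
      if PySem.Str.startswith stripped "#" then []
      else if stripped ≠ "" then stripped :: pa_collect rest
      else pa_collect rest

def paragraph_after (lines : List String) (heading : String) : String :=
  match find_heading_index (stripped_lines lines) heading with
  | none => ""
  | some start =>
      PySem.Str.join " " (pa_collect (PySem.List.slice lines (some (start + 1)) none))

-- ===== PORT B =====
-- single pass with a 'found' flag and an accumulator
def pa_loop (lines : List String) (heading : String) (found : Bool) (content : List String) : List String :=
  match lines with
  | [] => content
  | line :: rest =>
      let stripped := PySem.Str.strip line
      if !found then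
        pa_loop rest heading (stripped == heading) content
      else if PySem.Str.startswith stripped "#" then content
      else if stripped ≠ "" then pa_loop rest heading found (content ++ [stripped])
      else pa_loop rest heading found content

def paragraph_after_alt (lines : List String) (heading : String) : String :=
  PySem.Str.join " " (pa_loop lines heading false [])

-- ===== PRECONDITION & SPEC =====
def Spec_paragraph_after (lines : List String) (heading : String) (out : String) : Prop := out = paragraph_after_alt lines heading
instance (lines : List String) (heading : String) (out : String) : Decidable (Spec_paragraph_after lines heading out) := by unfold Spec_paragraph_after; infer_instance

-- ===== CLAIM (what is proved, stated in full; the proofs are below) =====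
def Claim_equal_paragraph_after : Prop := ∀ (lines : List String) (heading : String), Dom_paragraph_after lines heading → Spec_paragraph_after lines heading (paragraph_after lines heading)

-- ===== LEMMAS AND PROOFS =====

-- once the flag is set, B's loop appends exactly A's collect list
lemma pa_loop_found (lines : List String) (heading : String) :
    ∀ content, pa_loop lines heading true content = content ++ pa_collect lines := by
  induction lines with
  | nil => intro c; simp [pa_loop, pa_collect]
  | cons l ls ih =>
      intro c
      simp only [pa_loop, pa_collect, Bool.not_true, Bool.false_eq_true, if_false]
      split_ifs with h1 h2
      · simp
      · rw [ih]; simp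
      · exact ih c

-- the aux finder shifted by one
lemma find_aux_shift (lines : List String) (heading : String) (i : Int) :
    find_heading_index_aux lines heading (i + 1)
      = (find_heading_index_aux lines heading i).map (· + 1) := by
  induction lines generalizing i with
  | nil => simp [find_heading_index_aux]
  | cons l ls ih =>
      simp only [find_heading_index_aux]
      split_ifs with h
      · simp
      · exact ih (i + 1)

lemma find_aux_nonneg (lines : List String) (heading : String) (i k : Int)
    (hi : 0 ≤ i) (h : find_heading_index_aux lines heading i = some k) : 0 ≤ k := by
  induction lines generalizing i with
  | nil => simp [find_heading_index_aux] at h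
  | cons l ls ih =>
      simp only [find_heading_index_aux] at h
      split_ifs at h with hl
      · simp only [Option.some.injEq] at h; omega
      · exact ih (i + 1) (by omega) h

lemma main_eq (lines : List String) (heading : String) :
    paragraph_after lines heading = paragraph_after_alt lines heading := by
  induction lines with
  | nil =>
      simp [paragraph_after, paragraph_after_alt, stripped_lines, find_heading_index,
        find_heading_index_aux, pa_loop, PySem.Str.join]
  | cons l ls ih =>
      by_cases hl : PySem.Str.strip l = heading
      · -- heading found at the head: A slices off the head, B flips the flag
        simp only [paragraph_after, paragraph_after_alt, stripped_lines, find_heading_index,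
          find_heading_index_aux, List.map_cons, hl, beq_self_eq_true, if_true]
        rw [show ((0 : Int) + 1) = ((1 : Nat) : Int) by norm_num,
          PySem.List.slice_from_natCast]
        simp [pa_loop, hl, pa_loop_found]
      · -- head is not the heading: both sides reduce to the tail
        have hbeq : (PySem.Str.strip l == heading) = false := by
          simp [hl]
        simp only [paragraph_after, paragraph_after_alt, stripped_lines, find_heading_index,
          find_heading_index_aux, List.map_cons, hbeq, if_false, Bool.false_eq_true]
        rw [show ((0 : Int) + 1) = ((0 : Int) + 1) from rfl, find_aux_shift]
        cases hfind : find_heading_index_aux (ls.map fun line => PySem.Str.strip line) heading 0 with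
        | none =>
            simp only [paragraph_after, paragraph_after_alt, stripped_lines, find_heading_index,
              hfind] at ih
            simpa [pa_loop, hbeq, Option.map] using ih
        | some k =>
            have hk : 0 ≤ k := find_aux_nonneg _ _ 0 k le_rfl hfind
            simp only [paragraph_after, paragraph_after_alt, stripped_lines, find_heading_index,
              hfind] at ih
            simp only [Option.map]
            rw [PySem.List.slice_from (l :: ls) (by omega : (0:Int) ≤ k + 1 + 1)]
            rw [PySem.List.slice_from ls (by omega : (0:Int) ≤ k + 1)] at ih
            have hdrop : (l :: ls).drop (k + 1 + 1).toNat = ls.drop (k + 1).toNat := by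
              have : (k + 1 + 1).toNat = (k + 1).toNat + 1 := by omega
              simp [this]
            rw [hdrop]
            simpa [pa_loop, hbeq] using ih

-- ===== VERDICT (by name: the statement is the Claim_ definition above) =====
theorem paragraph_after_spec : Claim_equal_paragraph_after := by
  intro lines heading _
  unfold Spec_paragraph_after
  exact main_eq lines heading
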